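-- pv_equiv track=rewrite | github.com/nath54/ifiction_engine_map_creator | labyrinth_creator.py | get_non_connected_neighbour_rooms
-- ===== SOURCE A (Python) =====
-- from typing import Any
--
-- room_t = tuple[int, int, int]
--
-- def sort_things(thing1: Any, thing2: Any) -> tuple[Any, Any]:
--     #
--     if thing1 <= thing2:
--         #
--         return (thing1, thing2)
--     #
--     return (thing2, thing1)
--
-- def get_non_connected_neighbour_rooms(tx: int, ty: int, tz: int, doors: dict[room_t, set[room_t]], rroom: room_t) -> list[room_t]:
--
--     #
--     dx_options: list[int] = [0]
--     dy_options: list[int] = [0]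
--     dz_options: list[int] = [0]
--     #
--     if rroom[0] > 0: dx_options.append(-1)
--     if rroom[0] < tx - 1: dx_options.append(1)
--     if rroom[1] > 0: dy_options.append(-1)
--     if rroom[1] < ty - 1: dy_options.append(1)
--     if rroom[2] > 0: dz_options.append(-1)
--     if rroom[2] < tz - 1: dz_options.append(1)
--
--     #
--     options: list[room_t] = []
--     #
--     for dx in dx_options:
--         #
--         for dy in dy_options:
--             #
--             for dz in dz_options:
--
--                 #
--                 if abs(dx) + abs(dy) + abs(dz) != 1:
--                     #
--                     continue
--
--                 #
--                 nroom: room_t = (rroom[0]+dx, rroom[1]+dy, rroom[2]+dz)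
--
--                 #
--                 if check_door(doors=doors, room1=rroom, room2=nroom):
--                     #
--                     continue
--
--                 #
--                 options.append( nroom )
--
--     #
--     return options
--
-- def check_door(doors: dict[room_t, set[room_t]], room1: room_t, room2: room_t) -> bool:
--
--     #
--     room1, room2 = sort_things(thing1=room1, thing2=room2)
--
--     #
--     if room1 not in doors:
--         #
--         return False
--
--     #
--     return room2 in doors[room1]
-- ===== SOURCE B (Python) =====
-- def get_non_connected_neighbour_rooms(tx, ty, tz, doors, rroom):
--     x, y, z = rroom
--     candidates = (
--         ((x, y, z - 1), z > 0),
--         ((x, y, z + 1), z < tz - 1),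
--         ((x, y - 1, z), y > 0),
--         ((x, y + 1, z), y < ty - 1),
--         ((x - 1, y, z), x > 0),
--         ((x + 1, y, z), x < tx - 1),
--     )
--     out = []
--     for n, inside in candidates:
--         if not inside:
--             continue
--         a, b = (rroom, n) if rroom <= n else (n, rroom)
--         if b not in doors.get(a, ()):
--             out.append(n)
--     return out
-- ===== Notes on version B (the rewrite author's own statement) =====
-- stated objective: simpler
-- what changed: Replaced the three per-axis option lists, the 3x3x3 nested loops and the Manhattan-distance filter with a single flat pass over the six unit-offset neighbours (in A's emission order), each carrying its one inlined bound test, with the door lookup done via min/max ordering and dict.get instead of the check_door/sort_things helpers.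
import Mathlib
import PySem

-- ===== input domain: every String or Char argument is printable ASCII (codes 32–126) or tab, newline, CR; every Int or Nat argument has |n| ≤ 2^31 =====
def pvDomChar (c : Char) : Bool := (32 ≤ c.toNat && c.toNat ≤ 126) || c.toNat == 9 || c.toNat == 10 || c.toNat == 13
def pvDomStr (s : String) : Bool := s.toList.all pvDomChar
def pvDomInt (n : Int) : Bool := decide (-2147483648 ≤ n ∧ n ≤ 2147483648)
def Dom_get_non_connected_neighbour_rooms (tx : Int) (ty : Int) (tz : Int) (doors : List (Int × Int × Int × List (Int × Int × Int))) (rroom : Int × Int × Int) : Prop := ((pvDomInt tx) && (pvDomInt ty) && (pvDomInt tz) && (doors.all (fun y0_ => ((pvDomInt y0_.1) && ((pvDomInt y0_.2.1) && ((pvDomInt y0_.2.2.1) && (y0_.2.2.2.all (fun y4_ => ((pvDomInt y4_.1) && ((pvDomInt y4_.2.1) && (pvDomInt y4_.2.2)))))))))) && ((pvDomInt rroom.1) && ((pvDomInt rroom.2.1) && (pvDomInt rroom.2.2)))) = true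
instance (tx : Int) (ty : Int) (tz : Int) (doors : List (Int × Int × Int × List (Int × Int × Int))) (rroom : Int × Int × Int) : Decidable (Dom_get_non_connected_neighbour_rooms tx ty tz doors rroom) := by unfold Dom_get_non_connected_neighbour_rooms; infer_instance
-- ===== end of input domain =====

-- B replaces the 3×3×3 nested option loops + Manhattan filter by one flat pass over the six unit
-- neighbours (same order), with the bound test and min/max door lookup inlined; objective: simpler.

-- shared primitive: Python's tuple `<=` (lexicographic) on int triples
def tripLe (a b : Int × Int × Int) : Bool :=
  decide (a.1 < b.1 ∨ (a.1 = b.1 ∧ (a.2.1 < b.2.1 ∨ (a.2.1 = b.2.1 ∧ a.2.2 ≤ b.2.2))))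

-- shared primitive: Python dict lookup (first matching key) on the association list `doors`
def dictGet? (doors : List (Int × Int × Int × List (Int × Int × Int))) (k : Int × Int × Int) :
    Option (List (Int × Int × Int)) :=
  match doors with
  | [] => none
  | (a, b, c, v) :: rest => if (a, b, c) = k then some v else dictGet? rest k

-- ===== PORT A =====
def sort_things (t1 t2 : Int × Int × Int) : (Int × Int × Int) × (Int × Int × Int) :=
  if tripLe t1 t2 then (t1, t2) else (t2, t1)

def check_door (doors : List (Int × Int × Int × List (Int × Int × Int)))
    (room1 room2 : Int × Int × Int) : Bool :=
  let p := sort_things room1 room2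
  match dictGet? doors p.1 with
  | none => false
  | some s => s.contains p.2

def get_non_connected_neighbour_rooms (tx : Int) (ty : Int) (tz : Int) (doors : List (Int × Int × Int × List (Int × Int × Int))) (rroom : Int × Int × Int) : List (Int × Int × Int) :=
  let dx_options : List Int := [0] ++ (if rroom.1 > 0 then [-1] else []) ++ (if rroom.1 < tx - 1 then [1] else [])
  let dy_options : List Int := [0] ++ (if rroom.2.1 > 0 then [-1] else []) ++ (if rroom.2.1 < ty - 1 then [1] else [])
  let dz_options : List Int := [0] ++ (if rroom.2.2 > 0 then [-1] else []) ++ (if rroom.2.2 < tz - 1 then [1] else [])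
  dx_options.foldl (fun acc dx =>
    dy_options.foldl (fun acc dy =>
      dz_options.foldl (fun acc dz =>
        if dx.natAbs + dy.natAbs + dz.natAbs ≠ 1 then acc
        else
          let nroom := (rroom.1 + dx, rroom.2.1 + dy, rroom.2.2 + dz)
          if check_door doors rroom nroom then acc
          else acc ++ [nroom]) acc) acc) []

-- ===== PORT B =====
def get_non_connected_neighbour_rooms_alt (tx : Int) (ty : Int) (tz : Int) (doors : List (Int × Int × Int × List (Int × Int × Int))) (rroom : Int × Int × Int) : List (Int × Int × Int) :=
  let x := rroom.1
  let y := rroom.2.1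
  let z := rroom.2.2
  let candidates : List ((Int × Int × Int) × Bool) :=
    [((x, y, z - 1), decide (z > 0)), ((x, y, z + 1), decide (z < tz - 1)),
     ((x, y - 1, z), decide (y > 0)), ((x, y + 1, z), decide (y < ty - 1)),
     ((x - 1, y, z), decide (x > 0)), ((x + 1, y, z), decide (x < tx - 1))]
  candidates.foldl (fun out c =>
    if !c.2 then out
    else
      let p := if tripLe rroom c.1 then (rroom, c.1) else (c.1, rroom)
      if ((dictGet? doors p.1).getD []).contains p.2 then out
      else out ++ [c.1]) []

-- ===== PRECONDITION & SPEC =====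
def Spec_get_non_connected_neighbour_rooms (tx : Int) (ty : Int) (tz : Int) (doors : List (Int × Int × Int × List (Int × Int × Int))) (rroom : Int × Int × Int) (out : List (Int × Int × Int)) : Prop := out = get_non_connected_neighbour_rooms_alt tx ty tz doors rroom
instance (tx : Int) (ty : Int) (tz : Int) (doors : List (Int × Int × Int × List (Int × Int × Int))) (rroom : Int × Int × Int) (out : List (Int × Int × Int)) : Decidable (Spec_get_non_connected_neighbour_rooms tx ty tz doors rroom out) := by unfold Spec_get_non_connected_neighbour_rooms; infer_instance

-- ===== CLAIM (what is proved, stated in full; the proofs are below) =====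
def Claim_equal_get_non_connected_neighbour_rooms : Prop := ∀ (tx : Int) (ty : Int) (tz : Int) (doors : List (Int × Int × Int × List (Int × Int × Int))) (rroom : Int × Int × Int), Dom_get_non_connected_neighbour_rooms tx ty tz doors rroom → Spec_get_non_connected_neighbour_rooms tx ty tz doors rroom (get_non_connected_neighbour_rooms tx ty tz doors rroom)

-- ===== LEMMAS AND PROOFS =====
theorem check_door_eq (doors : List (Int × Int × Int × List (Int × Int × Int)))
    (r n : Int × Int × Int) :
    check_door doors r n =
      (((dictGet? doors (if tripLe r n then (r, n) else (n, r)).1).getD []).contains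
        (if tripLe r n then (r, n) else (n, r)).2) := by
  unfold check_door sort_things
  by_cases h : tripLe r n <;> simp [h] <;>
    rcases dictGet? doors _ with _ | s <;> simp

-- A's innermost loop body only ever appends: bring it to 'acc ++ …' form
theorem bodyA_eq (doors : List (Int × Int × Int × List (Int × Int × Int)))
    (x y z dx dy : Int) :
    (fun (acc : List (Int × Int × Int)) (dz : Int) =>
      if dx.natAbs + dy.natAbs + dz.natAbs ≠ 1 then acc
      else
        if check_door doors (x, y, z) (x + dx, y + dy, z + dz) then acc
        else acc ++ [(x + dx, y + dy, z + dz)]) =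
    (fun acc dz => acc ++
      (if dx.natAbs + dy.natAbs + dz.natAbs ≠ 1 then []
       else
         if check_door doors (x, y, z) (x + dx, y + dy, z + dz) then []
         else [(x + dx, y + dy, z + dz)])) := by
  funext acc dz; split_ifs <;> simp

-- B's loop body only ever appends: bring it to 'out ++ …' form
theorem bodyB_eq (doors : List (Int × Int × Int × List (Int × Int × Int)))
    (r : Int × Int × Int) :
    (fun (out : List (Int × Int × Int)) (c : (Int × Int × Int) × Bool) =>
      if !c.2 then out
      else
        let p := if tripLe r c.1 then (r, c.1) else (c.1, r)
        if ((dictGet? doors p.1).getD []).contains p.2 then out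
        else out ++ [c.1]) =
    (fun out c => out ++
      (if !c.2 then []
       else
         if ((dictGet? doors (if tripLe r c.1 then (r, c.1) else (c.1, r)).1).getD []).contains
             (if tripLe r c.1 then (r, c.1) else (c.1, r)).2 then []
         else [c.1])) := by
  funext out c; split_ifs <;> simp_all

-- ===== VERDICT (by name: the statement is the Claim_ definition above) =====
set_option maxHeartbeats 4000000 in
theorem get_non_connected_neighbour_rooms_spec : Claim_equal_get_non_connected_neighbour_rooms := by
  intro tx ty tz doors rroom _
  unfold Spec_get_non_connected_neighbour_rooms
  obtain ⟨x, y, z⟩ := rroom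
  unfold get_non_connected_neighbour_rooms get_non_connected_neighbour_rooms_alt
  simp only [bodyA_eq, bodyB_eq, PySem.List.foldl_append_eq_flatMap, List.nil_append]
  by_cases hx1 : x > 0 <;> by_cases hx2 : x + 1 < tx <;>
    by_cases hy1 : y > 0 <;> by_cases hy2 : y + 1 < ty <;>
    by_cases hz1 : z > 0 <;> by_cases hz2 : z + 1 < tz <;>
    simp [hx1, hx2, hy1, hy2, hz1, hz2, check_door_eq, sub_eq_add_neg]
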